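-- pv_equiv track=rewrite | github.com/PetraVidnerova/aoc_23 | day18.py | vertical_count
-- ===== SOURCE A (Python) =====
-- def vertical_count(line):
--     count = 0
--     l = ""
--     for x in line:
--         if x == "-":
--             count += 1
--         elif x in "FJL7":
--             if not l:
--                 l += x
--             else:
--                 l += x
--                 if l in ("7L", "FJ"):
--                     count  += 1
--                 l = ""
--     return count
-- ===== SOURCE B (Python) =====
-- def vertical_count(line):
--     dashes = len([x for x in line if x == "-"])
--     bends = [x for x in line if x in "FJL7"]
--     count = 0
--     while len(bends) >= 2:
--         if bends[0] + bends[1] in ("7L", "FJ"):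
--             count += 1
--         bends = bends[2:]
--     return dashes + count
-- ===== Notes on version B (the rewrite author's own statement) =====
-- stated objective: simpler
-- what changed: Replaces A's single stateful scan (a pending-bend string buffer threaded through one loop) by a decomposition: count dashes in one pass, extract the bend characters in another, then consume the bend list two at a time, discarding an unpaired trailing bend.
import Mathlib
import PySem

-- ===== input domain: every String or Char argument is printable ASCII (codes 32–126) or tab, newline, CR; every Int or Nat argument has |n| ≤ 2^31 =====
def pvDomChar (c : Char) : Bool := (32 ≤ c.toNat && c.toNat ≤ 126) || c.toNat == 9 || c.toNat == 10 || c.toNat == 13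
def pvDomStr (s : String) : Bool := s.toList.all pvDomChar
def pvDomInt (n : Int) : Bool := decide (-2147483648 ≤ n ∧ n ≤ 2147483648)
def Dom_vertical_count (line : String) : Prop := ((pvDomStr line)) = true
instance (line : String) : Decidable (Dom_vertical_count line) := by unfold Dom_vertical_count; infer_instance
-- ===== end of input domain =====

-- B replaces A's single stateful scan (pending-bend buffer) with a decomposition:
-- count dashes, extract the bend characters, then consume the bend list two at a time (simpler).


-- ===== PORT A =====
-- A's loop body: state is (count, l) where l (a ≤1-char buffer in Python) is kept as List Char
def vcStepA (st : Int × List Char) (x : Char) : Int × List Char :=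
  if x == '-' then (st.1 + 1, st.2)
  else if x == 'F' || x == 'J' || x == 'L' || x == '7' then
    if st.2.isEmpty then (st.1, st.2 ++ [x])
    else
      let l' := st.2 ++ [x]
      if l' == ['7', 'L'] || l' == ['F', 'J'] then (st.1 + 1, [])
      else (st.1, [])
  else st

def vertical_count (line : String) : Int :=
  (line.toList.foldl vcStepA (0, [])).1

-- ===== PORT B =====
-- Source B's while loop: consume the bend list two at a time with accumulator count
def vcPairsB : List Char → Int → Int
  | a :: b :: rest, count =>
      vcPairsB rest (count + (if (a == '7' && b == 'L') || (a == 'F' && b == 'J') then 1 else 0))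
  | _, count => count

def vertical_count_alt (line : String) : Int :=
  let dashes : Int := (line.toList.filter (fun x => x == '-')).length
  let bends := line.toList.filter (fun x => x == 'F' || x == 'J' || x == 'L' || x == '7')
  dashes + vcPairsB bends 0

-- ===== PRECONDITION & SPEC =====
def Spec_vertical_count (line : String) (out : Int) : Prop := out = vertical_count_alt line
instance (line : String) (out : Int) : Decidable (Spec_vertical_count line out) := by unfold Spec_vertical_count; infer_instance

-- ===== CLAIM (what is proved, stated in full; the proofs are below) =====
def Claim_equal_vertical_count : Prop := ∀ (line : String), Dom_vertical_count line → Spec_vertical_count line (vertical_count line)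

-- ===== LEMMAS AND PROOFS =====

theorem vcPairsB_acc : ∀ (bs : List Char) (c d : Int), vcPairsB bs (c + d) = c + vcPairsB bs d
  | a :: b :: rest, c, d => by
      simp only [vcPairsB, add_assoc]
      exact vcPairsB_acc rest c _
  | [], _, _ => by simp [vcPairsB]
  | [_], _, _ => by simp [vcPairsB]

theorem vcFold_eq (cs : List Char) (c : Int) (l : List Char) (hl : l.length ≤ 1) :
    (cs.foldl vcStepA (c, l)).1
      = c + ((cs.filter (fun x => x == '-')).length : Int)
          + vcPairsB (l ++ cs.filter (fun x => x == 'F' || x == 'J' || x == 'L' || x == '7')) 0 := by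
  induction cs generalizing c l with
  | nil =>
      match l, hl with
      | [], _ => simp [vcPairsB]
      | [a], _ => simp [vcPairsB]
  | cons x cs ih =>
      by_cases hd : x = '-'
      · subst hd
        have hnb : (('-' : Char) == 'F' || '-' == 'J' || '-' == 'L' || '-' == '7') = false := by
          decide
        simp only [List.foldl_cons, vcStepA, beq_self_eq_true, if_true, hnb,
          Bool.false_eq_true, if_false, List.filter_cons]
        rw [ih (c + 1) l hl]
        simp only [List.length_cons]
        push_cast
        ring
      · by_cases hb : x = 'F' ∨ x = 'J' ∨ x = 'L' ∨ x = '7'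
        · have hbB : (x == 'F' || x == 'J' || x == 'L' || x == '7') = true := by
            rcases hb with h | h | h | h <;> simp [h]
          have hdB : (x == '-') = false := by simpa using hd
          match l, hl with
          | [], _ =>
              simp only [List.foldl_cons, vcStepA, hdB, hbB, Bool.false_eq_true, if_false,
                if_true, List.isEmpty_nil, List.filter_cons, List.nil_append]
              rw [ih c [x] (by simp)]
              simp
          | [a], _ =>
              have hpair : (([a] ++ [x] : List Char) == ['7', 'L'] || ([a] ++ [x] : List Char) == ['F', 'J'])
                  = ((a == '7' && x == 'L') || (a == 'F' && x == 'J')) := by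
                by_cases h1 : a = '7' <;> by_cases h2 : x = 'L' <;>
                  by_cases h3 : a = 'F' <;> by_cases h4 : x = 'J' <;> simp [h1, h2, h3, h4]
              by_cases hp : ((a == '7' && x == 'L') || (a == 'F' && x == 'J')) = true
              · simp only [List.foldl_cons, vcStepA, hdB, hbB, Bool.false_eq_true, if_false,
                  if_true, List.isEmpty_cons, List.filter_cons, hpair, hp]
                rw [ih (c + 1) [] (by simp)]
                simp only [List.nil_append, List.singleton_append, vcPairsB, hp, if_true]
                rw [show (0 + 1 : Int) = 1 + 0 by ring, vcPairsB_acc]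
                ring
              · have hp' : ((a == '7' && x == 'L') || (a == 'F' && x == 'J')) = false := by
                  simpa using hp
                simp only [List.foldl_cons, vcStepA, hdB, hbB, Bool.false_eq_true, if_false,
                  if_true, List.isEmpty_cons, List.filter_cons, hpair, hp']
                rw [ih c [] (by simp)]
                simp [vcPairsB, hp']
        · have hbB : (x == 'F' || x == 'J' || x == 'L' || x == '7') = false := by
            push Not at hb
            simp [hb.1, hb.2.1, hb.2.2.1, hb.2.2.2]
          have hdB : (x == '-') = false := by simpa using hd
          simp only [List.foldl_cons, vcStepA, hdB, hbB, Bool.false_eq_true, if_false,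
            List.filter_cons]
          exact ih c l hl

-- ===== VERDICT (by name: the statement is the Claim_ definition above) =====
theorem vertical_count_spec : Claim_equal_vertical_count := by
  intro line _
  unfold Spec_vertical_count vertical_count vertical_count_alt
  rw [vcFold_eq line.toList 0 [] (by simp)]
  simp
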